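-- pv_equiv track=rewrite | github.com/Argonaut-Z/BadouNLP | 王子敬/week15/my_BPE.py | learn_vocab
-- ===== SOURCE A (Python) =====
-- from collections import defaultdict, Counter
--
-- def learn_vocab(corpus):
--     # 统计每个词的出现次数
--     word_counts = Counter(corpus)
--
--     # 初始化词表
--     vocab = defaultdict(int)
--     for word, count in word_counts.items():
--         # 进行分词，以</w>为结束标记
--         chars = list(word) + ['</w>']
--         for char in chars:
--             vocab[char] += count
--
--     # 将拆分结果存入字典中
--     words = {word: list(word) + ['</w>'] for word, count in word_counts.items()}
--     return vocab, words, word_counts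
-- ===== SOURCE B (Python) =====
-- from collections import defaultdict, Counter
--
-- def learn_vocab(corpus):
--     # One fused pass over the corpus: word counts, character tallies and the
--     # per-word splits are all built incrementally, without a second items() loop.
--     word_counts = Counter()
--     vocab = defaultdict(int)
--     words = {}
--     for word in corpus:
--         word_counts[word] += 1
--         for char in word:
--             vocab[char] += 1
--         vocab['</w>'] += 1
--         if word not in words:
--             words[word] = list(word) + ['</w>']
--     return vocab, words, word_counts
-- ===== Notes on version B (the rewrite author's own statement) =====
-- stated objective: alternative
-- what changed: B makes a single fused pass over the corpus, updating the word counter, the character-tally vocab and the split table incrementally per occurrence, instead of A's build-Counter-first then two separate loops over word_counts.items().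
import Mathlib
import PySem

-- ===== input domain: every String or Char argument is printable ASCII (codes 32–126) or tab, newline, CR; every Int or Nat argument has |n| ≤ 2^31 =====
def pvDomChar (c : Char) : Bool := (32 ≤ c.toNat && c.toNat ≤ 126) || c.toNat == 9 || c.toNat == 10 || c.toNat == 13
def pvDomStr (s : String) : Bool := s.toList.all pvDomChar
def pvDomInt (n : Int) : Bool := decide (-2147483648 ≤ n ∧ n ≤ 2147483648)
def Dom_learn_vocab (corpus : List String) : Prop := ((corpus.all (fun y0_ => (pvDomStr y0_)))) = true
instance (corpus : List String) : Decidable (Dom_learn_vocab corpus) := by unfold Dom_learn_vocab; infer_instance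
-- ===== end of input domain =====

-- B fuses Counter building, character tallying and the split table into ONE pass over the
-- corpus (no second loop over word_counts.items()); same return value, objective: alternative.

-- `list(word) + ['</w>']` (used by both Pythons verbatim)
def pvSplit (w : String) : List String := w.toList.map (fun c => String.mk [c]) ++ ["</w>"]

-- ===== PORT A =====
def learn_vocab (corpus : List String) : (List (String × Int)) × (List (String × List String)) × (List (String × Int)) :=
  -- word_counts = Counter(corpus)
  let word_counts := PySem.Dict.counter corpus
  -- vocab = defaultdict(int); for word, count in word_counts.items(): for char in chars: vocab[char] += count
  let vocab := word_counts.items.foldl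
    (fun (v : PySem.Dict String Int) p =>
      (pvSplit p.1).foldl (fun v c => v.insert c (v.getD c 0 + p.2)) v)
    PySem.Dict.empty
  -- words = {word: list(word) + ['</w>'] for word, count in word_counts.items()}
  let words := word_counts.items.foldl
    (fun (d : PySem.Dict String (List String)) p => d.insert p.1 (pvSplit p.1))
    PySem.Dict.empty
  (vocab.items, words.items, word_counts.items)

-- ===== PORT B =====
def learn_vocab_alt (corpus : List String) : (List (String × Int)) × (List (String × List String)) × (List (String × Int)) :=
  let st := corpus.foldl
    (fun (st : PySem.Dict String Int × PySem.Dict String Int × PySem.Dict String (List String)) w =>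
      ( -- word_counts[word] += 1
        st.1.insert w (st.1.getD w 0 + 1),
        -- for char in word: vocab[char] += 1; vocab['</w>'] += 1
        (w.toList.foldl
          (fun (v : PySem.Dict String Int) c =>
            v.insert (String.mk [c]) (v.getD (String.mk [c]) 0 + 1)) st.2.1).insert "</w>"
          (((w.toList.foldl
              (fun (v : PySem.Dict String Int) c =>
                v.insert (String.mk [c]) (v.getD (String.mk [c]) 0 + 1)) st.2.1)).getD "</w>" 0 + 1),
        -- if word not in words: words[word] = list(word) + ['</w>']
        if st.2.2.contains w then st.2.2 else st.2.2.insert w (pvSplit w)))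
    (PySem.Dict.empty, PySem.Dict.empty, PySem.Dict.empty)
  (st.2.1.items, st.2.2.items, st.1.items)

-- ===== PRECONDITION & SPEC =====
def Spec_learn_vocab (corpus : List String) (out : (List (String × Int)) × (List (String × List String)) × (List (String × Int))) : Prop := out = learn_vocab_alt corpus
instance (corpus : List String) (out : (List (String × Int)) × (List (String × List String)) × (List (String × Int))) : Decidable (Spec_learn_vocab corpus out) := by unfold Spec_learn_vocab; infer_instance

-- ===== CLAIM (what is proved, stated in full; the proofs are below) =====
def Claim_equal_learn_vocab : Prop := ∀ (corpus : List String), Dom_learn_vocab corpus → Spec_learn_vocab corpus (learn_vocab corpus)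

-- ===== LEMMAS AND PROOFS =====

-- abbreviations used only by the proofs
def pvAdd (d : PySem.Dict String Int) (c : String) (n : Int) : PySem.Dict String Int :=
  d.insert c (d.getD c 0 + n)

def pvAddList (d : PySem.Dict String Int) (ps : List (String × Int)) : PySem.Dict String Int :=
  ps.foldl (fun d p => d.insert p.1 (d.getD p.1 0 + p.2)) d

-- a fold with three independent accumulators is three folds
theorem pv_foldl_triple {α β γ δ : Type} (l : List δ)
    (f1 : α → δ → α) (f2 : β → δ → β) (f3 : γ → δ → γ) (a : α) (b : β) (c : γ) :
    l.foldl (fun st w => (f1 st.1 w, f2 st.2.1 w, f3 st.2.2 w)) (a, b, c)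
      = (l.foldl f1 a, l.foldl f2 b, l.foldl f3 c) := by
  induction l generalizing a b c with
  | nil => rfl
  | cons x xs ih => simpa using ih (f1 a x) (f2 b x) (f3 c x)

theorem pv_getD_addList (ps : List (String × Int)) (d : PySem.Dict String Int) (c : String) :
    (pvAddList d ps).getD c 0
      = d.getD c 0 + (ps.map (fun p => if p.1 = c then p.2 else 0)).sum := by
  induction ps generalizing d with
  | nil => simp [pvAddList]
  | cons p rest ih =>
    have h := ih (d.insert p.1 (d.getD p.1 0 + p.2))
    simp only [pvAddList, List.foldl_cons] at h ⊢
    rw [h, PySem.Dict.getD_insert]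
    rcases eq_or_ne p.1 c with hc | hc
    · subst hc; simp; ring
    · simp [hc, Ne.symm hc]

theorem pv_keys_addList (ps : List (String × Int)) :
    (pvAddList PySem.Dict.empty ps).keys = PySem.Set.ofList (ps.map (·.1)) := by
  unfold pvAddList
  rw [PySem.Dict.keys_foldl_insert_key (key := fun p : String × Int => p.1)
        (f := fun d p => d.getD p.1 0 + p.2)]
  simp [PySem.Set.update_nil_left]

theorem pv_nodup_keys_addList (ps : List (String × Int)) :
    (pvAddList PySem.Dict.empty ps).keys.Nodup := by
  unfold pvAddList
  exact PySem.Dict.nodup_keys_foldl_insert_key ps (fun p => p.1)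
    (fun d p => d.getD p.1 0 + p.2) _ (by simp)

-- sum of pointwise sums
theorem pv_sum_map_add (l : List String) (f g : String → Int) :
    (l.map (fun x => f x + g x)).sum = (l.map f).sum + (l.map g).sum := by
  induction l with
  | nil => simp
  | cons x xs ih => simp [ih]; ring

theorem pv_sum_if_count (l : List String) (c : String) (n : Int) :
    (l.map (fun x => if x = c then n else 0)).sum = (l.count c : Int) * n := by
  induction l with
  | nil => simp
  | cons x xs ih =>
    rcases eq_or_ne x c with hx | hx
    · subst hx; simp [ih]; ring
    · simp [hx, ih]

theorem pv_sum_if_single (l : List String) (hnd : l.Nodup) (c : String) (hc : c ∈ l) (n : Int) :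
    (l.map (fun x => if x = c then n else 0)).sum = n := by
  induction l with
  | nil => simp at hc
  | cons x xs ih =>
    rcases List.nodup_cons.mp hnd with ⟨hx, hxs⟩
    rcases List.mem_cons.mp hc with h | h
    · subst h
      have hz : (xs.map (fun y => if y = c then n else 0)).sum = 0 := by
        have : ∀ y ∈ xs, (if y = c then n else 0) = (0 : Int) := by
          intro y hy
          rw [if_neg]
          intro he; exact hx (he ▸ hy)
        rw [List.map_congr_left this]
        simp
      simp [hz]
    · have hne : x ≠ c := by
        intro he; subst he; exact hx h
      simp [hne, ih hxs h]

-- grouping: summing g over the corpus = summing count·g over the distinct words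
theorem pv_count_append_ne (L : List String) (w u : String) (hne : u ≠ w) :
    (L ++ [w]).count u = L.count u := by
  rw [List.count_append]
  have : List.count u [w] = 0 := List.count_eq_zero.mpr (by simp [hne])
  omega

theorem pv_sum_group (L : List String) (g : String → Int) :
    (L.map g).sum
      = ((PySem.Set.ofList L).map (fun w => (L.count w : Int) * g w)).sum := by
  induction L using List.reverseRecOn with
  | nil => simp
  | append_singleton L w ih =>
    rw [PySem.Set.ofList_append_singleton]
    by_cases hw : w ∈ L
    · rw [PySem.Set.add_of_mem ((PySem.Set.mem_ofList _ _).mpr hw)]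
      have hcnt : ∀ u, ((L ++ [w]).count u : Int)
          = (L.count u : Int) + (if u = w then 1 else 0) := by
        intro u
        by_cases hu : u = w
        · subst hu
          rw [List.count_append]
          have : List.count u [u] = 1 := by simp
          rw [this]; push_cast; simp
        · rw [pv_count_append_ne L w u hu]; simp [hu]
      calc ((L ++ [w]).map g).sum = (L.map g).sum + g w := by simp
        _ = ((PySem.Set.ofList L).map (fun u => (L.count u : Int) * g u)).sum + g w := by
              rw [ih]
        _ = ((PySem.Set.ofList L).map (fun u => (L.count u : Int) * g u)).sum
              + ((PySem.Set.ofList L).map (fun u => (if u = w then 1 else 0) * g u)).sum := by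
              congr 1
              have heq : ((PySem.Set.ofList L).map (fun u => (if u = w then 1 else 0) * g u))
                  = ((PySem.Set.ofList L).map (fun u => if u = w then g w else 0)) := by
                apply List.map_congr_left
                intro u _
                by_cases hu : u = w <;> simp [hu]
              rw [heq, pv_sum_if_single _ (PySem.Set.nodup_ofList L) w
                    ((PySem.Set.mem_ofList _ _).mpr hw)]
        _ = ((PySem.Set.ofList L).map (fun u => ((L ++ [w]).count u : Int) * g u)).sum := by
              rw [← pv_sum_map_add]
              apply congrArg
              apply List.map_congr_left
              intro u _
              rw [hcnt u]; ring
    · rw [PySem.Set.add_of_not_mem (fun h => hw ((PySem.Set.mem_ofList _ _).mp h))]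
      have hmapc : ((PySem.Set.ofList L).map (fun u => ((L ++ [w]).count u : Int) * g u))
          = ((PySem.Set.ofList L).map (fun u => (L.count u : Int) * g u)) := by
        apply List.map_congr_left
        intro u hu
        have hne : u ≠ w := fun he => hw (he ▸ (PySem.Set.mem_ofList _ _).mp hu)
        rw [pv_count_append_ne L w u hne]
      have h1 : ((L ++ [w]).count w : Int) = 1 := by
        rw [List.count_append, List.count_eq_zero.mpr hw]
        simp
      conv_rhs => rw [List.map_append, List.sum_append]
      rw [hmapc, ← ih]
      simp [List.count_eq_zero.mpr hw]

-- update by elements already present is the identity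
theorem pv_update_of_subset (s : PySem.Set String) (xs : List String)
    (h : ∀ x ∈ xs, x ∈ s) : PySem.Set.update s xs = s := by
  rw [PySem.Set.update_eq_append_filter]
  have hnil : (PySem.Set.ofList xs).filter (fun y => !(PySem.Set.contains s y)) = [] := by
    apply List.filter_eq_nil_iff.mpr
    intro y hy
    have hys : PySem.Set.contains s y = true :=
      (PySem.Set.contains_iff _ _).mpr (h y ((PySem.Set.mem_ofList _ _).mp hy))
    simp only [hys, Bool.not_true]
    exact Bool.false_ne_true
  rw [hnil, List.append_nil]

-- first-occurrence order of the flattened lists is unchanged by deduplicating the outer list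
theorem pv_ofList_flatMap_dedup (L : List String) (f : String → List String) :
    PySem.Set.ofList ((PySem.Set.ofList L).flatMap f) = PySem.Set.ofList (L.flatMap f) := by
  induction L using List.reverseRecOn with
  | nil => rfl
  | append_singleton L w ih =>
    rw [PySem.Set.ofList_append_singleton, List.flatMap_append]
    by_cases hw : w ∈ L
    · rw [PySem.Set.add_of_mem ((PySem.Set.mem_ofList _ _).mpr hw), ih,
        PySem.Set.ofList_append]
      symm
      apply pv_update_of_subset
      intro x hx
      simp only [List.flatMap_singleton] at hx
      exact (PySem.Set.mem_ofList _ _).mpr (List.mem_flatMap.mpr ⟨w, hw, hx⟩)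
    · rw [PySem.Set.add_of_not_mem (fun h => hw ((PySem.Set.mem_ofList _ _).mp h)),
        List.flatMap_append, PySem.Set.ofList_append, PySem.Set.ofList_append, ih]

-- ===== the three components =====

-- word_counts: B's fused first component is literally the Counter fold
theorem pv_wc_eq (corpus : List String) :
    corpus.foldl (fun (d : PySem.Dict String Int) w => d.insert w (d.getD w 0 + 1))
      PySem.Dict.empty = PySem.Dict.counter corpus :=
  PySem.Dict.foldl_insert_getD_add_one_eq_counter corpus

-- words, B side: items of the conditional-insert fold
theorem pv_wordsB (corpus : List String) :
    (corpus.foldl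
        (fun (d : PySem.Dict String (List String)) w =>
          if d.contains w then d else d.insert w (pvSplit w)) PySem.Dict.empty)
      = PySem.Dict.mk ((PySem.Set.ofList corpus).map (fun w => (w, pvSplit w))) := by
  induction corpus using List.reverseRecOn with
  | nil => rfl
  | append_singleton L w ih =>
    rw [List.foldl_append, List.foldl_cons, List.foldl_nil, ih,
      PySem.Set.ofList_append_singleton]
    have hk : (PySem.Dict.mk ((PySem.Set.ofList L).map (fun w => (w, pvSplit w)))).keys
        = PySem.Set.ofList L := by
      simp [PySem.Dict.keys, Function.comp_def]
    by_cases hw : w ∈ L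
    · have hm : w ∈ PySem.Set.ofList L := (PySem.Set.mem_ofList _ _).mpr hw
      have hc : (PySem.Dict.mk ((PySem.Set.ofList L).map
          (fun w => (w, pvSplit w)))).contains w = true := by
        rw [PySem.Dict.contains_iff_mem_keys, hk]
        exact hm
      rw [if_pos hc, PySem.Set.add_of_mem hm]
    · have hm : w ∉ PySem.Set.ofList L := fun h => hw ((PySem.Set.mem_ofList _ _).mp h)
      have hc : ¬ ((PySem.Dict.mk ((PySem.Set.ofList L).map
          (fun w => (w, pvSplit w)))).contains w = true) := by
        rw [PySem.Dict.contains_iff_mem_keys, hk]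
        exact hm
      rw [if_neg hc]
      apply PySem.Dict.ext
      rw [PySem.Dict.items_insert_of_not_contains _ _ (Bool.eq_false_iff.mpr hc),
        PySem.Set.add_of_not_mem hm]
      simp

-- words, A side
theorem pv_wordsA (corpus : List String) :
    ((PySem.Dict.counter corpus).items.foldl
        (fun (d : PySem.Dict String (List String)) p => d.insert p.1 (pvSplit p.1))
        PySem.Dict.empty).items
      = (PySem.Set.ofList corpus).map (fun w => (w, pvSplit w)) := by
  rw [PySem.Dict.items_counter, List.foldl_map]
  have := PySem.Dict.items_foldl_insert_fresh (l := PySem.Set.ofList corpus)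
    (k := fun w => w) (v := fun w => pvSplit w) (d := PySem.Dict.empty)
    (by intro a _; simp) (List.nodup_map_iff (fun _ _ h => h) |>.mpr (PySem.Set.nodup_ofList corpus))
  simpa using this

-- sum over a flattened list
theorem pv_sum_flatMap {α : Type} (l : List α) (g : α → List Int) :
    (l.flatMap g).sum = (l.map (fun x => (g x).sum)).sum := by
  induction l with
  | nil => rfl
  | cons x xs ih => simp [ih]

-- vocab: both sides as pvAddList over a flat (key, amount) list
theorem pv_vocabA_flat (corpus : List String) :
    ((PySem.Dict.counter corpus).items.foldl
        (fun (v : PySem.Dict String Int) p =>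
          (pvSplit p.1).foldl (fun v c => v.insert c (v.getD c 0 + p.2)) v)
        PySem.Dict.empty)
      = pvAddList PySem.Dict.empty
          ((PySem.Dict.counter corpus).items.flatMap
            (fun p => (pvSplit p.1).map (fun c => (c, p.2)))) := by
  unfold pvAddList
  rw [List.foldl_flatMap]
  apply PySem.List.foldl_congr_mem
  intro v p _
  rw [List.foldl_map]

theorem pv_vocabB_flat (corpus : List String) :
    (corpus.foldl
        (fun (v : PySem.Dict String Int) w =>
          (w.toList.foldl
            (fun (v : PySem.Dict String Int) c =>
              v.insert (String.mk [c]) (v.getD (String.mk [c]) 0 + 1)) v).insert "</w>"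
            ((w.toList.foldl
              (fun (v : PySem.Dict String Int) c =>
                v.insert (String.mk [c]) (v.getD (String.mk [c]) 0 + 1)) v).getD "</w>" 0 + 1))
        PySem.Dict.empty)
      = pvAddList PySem.Dict.empty
          (corpus.flatMap (fun w => (pvSplit w).map (fun c => (c, (1 : Int))))) := by
  unfold pvAddList
  rw [List.foldl_flatMap]
  apply PySem.List.foldl_congr_mem
  intro v w _
  rw [List.foldl_map]
  simp only [pvSplit, List.foldl_append, List.foldl_map, List.foldl_cons, List.foldl_nil]

theorem pv_inner (w : String) (n : Int) (c : String) :
    (((pvSplit w).map (fun c' => (c', n))).map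
      (fun p : String × Int => if p.1 = c then p.2 else 0)).sum
      = ((pvSplit w).count c : Int) * n := by
  rw [List.map_map]
  have hc : ((fun p : String × Int => if p.1 = c then p.2 else 0) ∘ fun c' => (c', n))
      = fun x => if x = c then n else 0 := rfl
  rw [hc, pv_sum_if_count]

theorem pv_vocab_eq (corpus : List String) :
    pvAddList PySem.Dict.empty
        ((PySem.Dict.counter corpus).items.flatMap
          (fun p => (pvSplit p.1).map (fun c => (c, p.2))))
      = pvAddList PySem.Dict.empty
          (corpus.flatMap (fun w => (pvSplit w).map (fun c => (c, (1 : Int))))) := by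
  set psA := (PySem.Dict.counter corpus).items.flatMap
    (fun p => (pvSplit p.1).map (fun c => (c, p.2))) with hpsA
  set psB := corpus.flatMap (fun w => (pvSplit w).map (fun c => (c, (1 : Int)))) with hpsB
  have hkeysA : psA.map (·.1) = (PySem.Set.ofList corpus).flatMap pvSplit := by
    rw [hpsA, PySem.Dict.items_counter, List.map_flatMap, List.flatMap_map]
    simp [List.map_map, Function.comp_def]
  have hkeysB : psB.map (·.1) = corpus.flatMap pvSplit := by
    rw [hpsB, List.map_flatMap]
    simp [List.map_map, Function.comp_def]
  have hkeys : (pvAddList PySem.Dict.empty psA).keys = (pvAddList PySem.Dict.empty psB).keys := by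
    rw [pv_keys_addList, pv_keys_addList, hkeysA, hkeysB]
    exact pv_ofList_flatMap_dedup corpus pvSplit
  have hgetD : ∀ c, (pvAddList PySem.Dict.empty psA).getD c 0
      = (pvAddList PySem.Dict.empty psB).getD c 0 := by
    intro c
    rw [pv_getD_addList, pv_getD_addList]
    congr 1
    rw [hpsA, hpsB, PySem.Dict.items_counter, List.map_flatMap, List.map_flatMap,
      pv_sum_flatMap, pv_sum_flatMap, List.map_map]
    have hcompA : ((fun x : String × Int =>
          (List.map (fun p : String × Int => if p.1 = c then p.2 else 0)
            (List.map (fun c' => (c', x.2)) (pvSplit x.1))).sum)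
          ∘ (fun k : String => (k, (corpus.count k : Int))))
        = fun k => (corpus.count k : Int) * ((pvSplit k).count c : Int) := by
      funext k
      simp only [Function.comp_def]
      rw [pv_inner k ((corpus.count k : Int)) c, mul_comm]
    have hfB : (fun x : String =>
          (List.map (fun p : String × Int => if p.1 = c then p.2 else 0)
            (List.map (fun c' => (c', (1 : Int))) (pvSplit x))).sum)
        = fun w : String => ((pvSplit w).count c : Int) := by
      funext w
      rw [pv_inner w 1 c, mul_one]
    rw [hcompA, hfB, ← pv_sum_group corpus (fun w => ((pvSplit w).count c : Int))]
  -- conclude via items = keys.map (k, getD k 0)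
  apply PySem.Dict.ext
  rw [PySem.Dict.items_eq_map_keys _ (pv_nodup_keys_addList psA) 0,
      PySem.Dict.items_eq_map_keys _ (pv_nodup_keys_addList psB) 0, hkeys]
  apply List.map_congr_left
  intro k _
  rw [hgetD k]

-- ===== VERDICT (by name: the statement is the Claim_ definition above) =====
theorem learn_vocab_spec : Claim_equal_learn_vocab := by
  intro corpus _
  show learn_vocab corpus = learn_vocab_alt corpus
  simp only [learn_vocab, learn_vocab_alt]
  rw [pv_foldl_triple
      (f1 := fun (d : PySem.Dict String Int) w => d.insert w (d.getD w 0 + 1))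
      (f2 := fun (v : PySem.Dict String Int) w =>
        (w.toList.foldl (fun (v : PySem.Dict String Int) c =>
            v.insert (String.mk [c]) (v.getD (String.mk [c]) 0 + 1)) v).insert "</w>"
          ((w.toList.foldl (fun (v : PySem.Dict String Int) c =>
            v.insert (String.mk [c]) (v.getD (String.mk [c]) 0 + 1)) v).getD "</w>" 0 + 1))
      (f3 := fun (d : PySem.Dict String (List String)) w =>
        if d.contains w then d else d.insert w (pvSplit w))]
  rw [pv_wc_eq, pv_wordsA, pv_wordsB, pv_vocabA_flat, pv_vocabB_flat, pv_vocab_eq]
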